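-- pv_equiv track=rewrite | github.com/niteshrajanagalu/NetSure | intelligence_engine.py | _exploit_risk_level
-- ===== SOURCE A (Python) =====
-- from typing import Callable, TypedDict
--
-- class KnownExploit(TypedDict):
--     """A known public exploit pattern associated with a service or port."""
--
--     name: str
--     severity: str   # "HIGH" | "MEDIUM" | "LOW"
--     note: str
--
-- def _exploit_risk_level(exploits: list[KnownExploit]) -> str:
--     """Return overall exploit risk level from the collected exploit list."""
--     for e in exploits:
--         if e["severity"] == "HIGH":
--             return "HIGH"
--     for e in exploits:
--         if e["severity"] == "MEDIUM":
--             return "MEDIUM"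
--     return "LOW"
-- ===== SOURCE B (Python) =====
-- def _exploit_risk_level(exploits):
--     """Return overall exploit risk level from the collected exploit list."""
--     rank = {"HIGH": 2, "MEDIUM": 1}
--     m = max((rank.get(e["severity"], 0) for e in exploits), default=0)
--     return ("LOW", "MEDIUM", "HIGH")[m]
-- ===== Notes on version B (the rewrite author's own statement) =====
-- stated objective: simpler
-- what changed: Replaces A's two ordered early-return membership scans with a single max-reduction over a numeric severity rank, indexing back into ('LOW','MEDIUM','HIGH').
-- outside the precondition, e.g. on _exploit_risk_level([{'severity': 'HIGH'}, {}]): A returns 'HIGH', B raises KeyError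
import Mathlib
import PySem

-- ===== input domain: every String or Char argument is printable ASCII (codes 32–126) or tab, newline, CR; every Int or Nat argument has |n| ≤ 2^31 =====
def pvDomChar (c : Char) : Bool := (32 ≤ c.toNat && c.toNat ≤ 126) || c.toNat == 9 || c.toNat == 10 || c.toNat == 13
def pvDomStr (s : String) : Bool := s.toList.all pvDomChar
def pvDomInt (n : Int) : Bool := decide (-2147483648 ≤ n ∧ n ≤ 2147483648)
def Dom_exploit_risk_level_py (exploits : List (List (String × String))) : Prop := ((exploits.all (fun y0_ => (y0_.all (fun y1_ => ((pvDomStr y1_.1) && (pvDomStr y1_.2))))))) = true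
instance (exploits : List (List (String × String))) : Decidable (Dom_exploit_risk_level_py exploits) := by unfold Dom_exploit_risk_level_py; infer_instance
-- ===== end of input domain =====

-- B replaces A's two ordered early-return scans with one max-reduction over a numeric severity rank (objective: simpler).


-- e["severity"]; under Pre_ the key is present, so the .getD "" default is never consulted
def pvSev (e : List (String × String)) : String := ((PySem.Dict.mk e).get? "severity").getD ""

-- ===== PORT A =====
-- first loop: 'for e in exploits: if e["severity"] == "HIGH": return "HIGH"'
def pvALoopHigh : List (List (String × String)) → Bool
  | [] => false
  | e :: rest => if pvSev e == "HIGH" then true else pvALoopHigh rest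

-- second loop: 'for e in exploits: if e["severity"] == "MEDIUM": return "MEDIUM"'
def pvALoopMed : List (List (String × String)) → Bool
  | [] => false
  | e :: rest => if pvSev e == "MEDIUM" then true else pvALoopMed rest

def exploit_risk_level_py (exploits : List (List (String × String))) : String :=
  if pvALoopHigh exploits then "HIGH"
  else if pvALoopMed exploits then "MEDIUM"
  else "LOW"

-- ===== PORT B =====
-- rank.get(e["severity"], 0)
def pvRank (s : String) : Int :=
  ((PySem.Dict.mk [("HIGH", (2 : Int)), ("MEDIUM", 1)]).get? s).getD 0

def exploit_risk_level_py_alt (exploits : List (List (String × String))) : String :=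
  let m : Int := exploits.foldl (fun acc e => max acc (pvRank (pvSev e))) 0
  -- ("LOW", "MEDIUM", "HIGH")[m]
  if m == 2 then "HIGH" else if m == 1 then "MEDIUM" else "LOW"

-- ===== PRECONDITION & SPEC =====
-- Pre_ excludes inputs where some exploit dict lacks the "severity" key: Python A raises KeyError on them unless an
-- earlier HIGH entry lets it return early, and B's single full scan raises KeyError on all of them.
def Pre_exploit_risk_level_py (exploits : List (List (String × String))) : Prop :=
  ∀ e ∈ exploits, ((PySem.Dict.mk e).get? "severity").isSome = true
instance (exploits : List (List (String × String))) : Decidable (Pre_exploit_risk_level_py exploits) := by unfold Pre_exploit_risk_level_py; infer_instance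
def pvWitness_exploit_risk_level_py : (List (List (String × String))) := [[("severity", "HIGH")], [("severity", "LOW")]]

def Spec_exploit_risk_level_py (exploits : List (List (String × String))) (out : String) : Prop := out = exploit_risk_level_py_alt exploits
instance (exploits : List (List (String × String))) (out : String) : Decidable (Spec_exploit_risk_level_py exploits out) := by unfold Spec_exploit_risk_level_py; infer_instance

-- ===== CLAIM (what is proved, stated in full; the proofs are below) =====
def Claim_equal_exploit_risk_level_py : Prop := ∀ (exploits : List (List (String × String))), Dom_exploit_risk_level_py exploits → Pre_exploit_risk_level_py exploits → Spec_exploit_risk_level_py exploits (exploit_risk_level_py exploits)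

-- ===== LEMMAS AND PROOFS =====

-- A's result rank: what the pair of early-return loops amounts to
def pvRankA (exploits : List (List (String × String))) : Int :=
  if pvALoopHigh exploits then 2 else if pvALoopMed exploits then 1 else 0

lemma pvRankA_bounds (xs : List (List (String × String))) :
    0 ≤ pvRankA xs ∧ pvRankA xs ≤ 2 := by
  unfold pvRankA; split_ifs <;> omega

lemma pvRank_cases (s : String) :
    pvRank s = if s == "HIGH" then 2 else if s == "MEDIUM" then 1 else 0 := by
  by_cases h1 : s = "HIGH"
  · subst h1; decide
  · by_cases h2 : s = "MEDIUM"
    · subst h2; decide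
    · have e1 : ("HIGH" == s) = false := beq_eq_false_iff_ne.mpr (Ne.symm h1)
      have e2 : ("MEDIUM" == s) = false := beq_eq_false_iff_ne.mpr (Ne.symm h2)
      simp [pvRank, PySem.Dict.get?, List.find?, e1, e2, h1, h2]

lemma pvRankA_cons (e : List (String × String)) (rest : List (List (String × String))) :
    pvRankA (e :: rest) = max (pvRank (pvSev e)) (pvRankA rest) := by
  rw [pvRank_cases]
  by_cases h1 : pvSev e == "HIGH" <;> by_cases h2 : pvSev e == "MEDIUM" <;>
    cases hH : pvALoopHigh rest <;> cases hM : pvALoopMed rest <;>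
      simp [pvRankA, pvALoopHigh, pvALoopMed, h1, h2, hH, hM]

lemma pvFold_eq (xs : List (List (String × String))) (acc : Int) (hacc : 0 ≤ acc) :
    xs.foldl (fun acc e => max acc (pvRank (pvSev e))) acc = max acc (pvRankA xs) := by
  induction xs generalizing acc with
  | nil => simp [pvRankA, pvALoopHigh, pvALoopMed]; omega
  | cons e rest ih =>
    simp only [List.foldl_cons]
    rw [ih (max acc (pvRank (pvSev e))) (le_trans hacc (le_max_left _ _)), pvRankA_cons]
    omega

-- ===== VERDICT (by name: the statement is the Claim_ definition above) =====
theorem exploit_risk_level_py_spec : Claim_equal_exploit_risk_level_py := by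
  intro xs _ _
  unfold Spec_exploit_risk_level_py exploit_risk_level_py exploit_risk_level_py_alt
  rw [pvFold_eq xs 0 le_rfl]
  have hb := pvRankA_bounds xs
  unfold pvRankA at *
  cases hH : pvALoopHigh xs <;> cases hM : pvALoopMed xs <;> simp_all
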